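-- pv_equiv track=rewrite | github.com/sandip-sadhukhan/Daily_Python_DSA_Algo | Problems/Arrays/5_ChocklateDistribution.py | simpleSolution
-- ===== SOURCE A (Python) =====
-- from itertools import combinations
-- from typing import List
--
-- def simpleSolution(arr: List[int], m: int) -> int:
--     """Time- O(nm) (not sure)
--     Space - O(1)"""
--     min_diff = int(1e9)
--
--     all_comb = list(combinations(arr, m))
--     # for each combination we wil find min, max, and diff
--     for comb in all_comb:
--         maxEle = max(comb)
--         minEle = min(comb)
--         diff = maxEle - minEle
--         if diff < min_diff:
--             min_diff = diff
--
--     return min_diff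
-- ===== SOURCE B (Python) =====
-- def simpleSolution(arr, m):
--     s = sorted(arr)
--     return min([10 ** 9] + [b - a for a, b in zip(s, s[m - 1:])])
-- ===== Notes on version B (the rewrite author's own statement) =====
-- stated objective: faster
-- what changed: Replaced the enumeration of all C(n,m) combinations (computing max/min of each) by sort-then-sliding-window: after sorting, an optimal m-subset is contiguous, so B takes the min of s[i+m-1]-s[i] seeded with A's initial 10**9; intended as asymptotically faster (a timing run saw A time out at n=64 where B returned, but could not confirm a ratio at the sizes both finish).
import Mathlib
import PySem

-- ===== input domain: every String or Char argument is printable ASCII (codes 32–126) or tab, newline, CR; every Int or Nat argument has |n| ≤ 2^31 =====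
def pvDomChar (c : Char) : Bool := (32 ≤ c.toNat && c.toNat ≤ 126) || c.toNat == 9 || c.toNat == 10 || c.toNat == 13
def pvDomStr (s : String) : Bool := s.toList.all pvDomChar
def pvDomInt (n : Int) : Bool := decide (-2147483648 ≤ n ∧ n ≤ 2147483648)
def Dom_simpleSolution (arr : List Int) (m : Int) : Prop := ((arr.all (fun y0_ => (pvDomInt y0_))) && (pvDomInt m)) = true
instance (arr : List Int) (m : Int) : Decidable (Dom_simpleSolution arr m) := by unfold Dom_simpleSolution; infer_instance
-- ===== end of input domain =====

-- B replaces A's enumeration of all C(n,m) combinations by sort + min sliding-window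
-- difference (seeded with A's initial 10**9); intended as faster (a timing run saw A
-- time out at n=64 where B returned, but could not confirm a ratio at smaller sizes).


-- ===== PORT A =====
def simpleSolution (arr : List Int) (m : Int) : Int :=
  let allComb := PySem.List.combinations arr m.toNat
  allComb.foldl (fun minDiff comb =>
    let maxEle := (PySem.List.max? comb (fun y => y)).getD 0
    let minEle := (PySem.List.min? comb (fun y => y)).getD 0
    let diff := maxEle - minEle
    if diff < minDiff then diff else minDiff) 1000000000

-- ===== PORT B =====
def simpleSolution_alt (arr : List Int) (m : Int) : Int :=
  let s := PySem.List.sorted arr (fun x => x) false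
  let ws := (s.zip (PySem.List.slice s (some (m - 1)) none)).map (fun p => p.2 - p.1)
  (PySem.List.min? ((1000000000 : Int) :: ws) (fun y => y)).getD 0

-- ===== PRECONDITION & SPEC =====
-- Pre_ excludes m ≤ 0, where the Python A raises ValueError (combinations on a
-- negative r, or max(()) on the empty combination when m = 0).
def Pre_simpleSolution (arr : List Int) (m : Int) : Prop := 1 ≤ m
instance (arr : List Int) (m : Int) : Decidable (Pre_simpleSolution arr m) := by unfold Pre_simpleSolution; infer_instance
def pvWitness_simpleSolution : List Int × Int := ([7, 3, 9, 1], 2)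

def Spec_simpleSolution (arr : List Int) (m : Int) (out : Int) : Prop := out = simpleSolution_alt arr m
instance (arr : List Int) (m : Int) (out : Int) : Decidable (Spec_simpleSolution arr m out) := by unfold Spec_simpleSolution; infer_instance

-- ===== CLAIM (what is proved, stated in full; the proofs are below) =====
def Claim_equal_simpleSolution : Prop := ∀ (arr : List Int) (m : Int), Dom_simpleSolution arr m → Pre_simpleSolution arr m → Spec_simpleSolution arr m (simpleSolution arr m)

-- ===== LEMMAS AND PROOFS =====

-- Python's max(c) is THE upper bound of c that lies in c.
lemma pyMax_eq_of_isMax {c : List Int} {M : Int} (hM : M ∈ c) (hub : ∀ y ∈ c, y ≤ M) :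
    (PySem.List.max? c (fun y => y)).getD 0 = M := by
  cases hx : PySem.List.max? c (fun y => y) with
  | none =>
      rw [PySem.List.max?_eq_none_iff] at hx
      simp [hx] at hM
  | some M' =>
      have h1 : M' ∈ c := PySem.List.max?_mem hx
      have h2 := PySem.List.max?_isMax hx
      simpa using le_antisymm (hub M' h1) (h2 M hM)

lemma pyMin_eq_of_isMin {c : List Int} {M : Int} (hM : M ∈ c) (hlb : ∀ y ∈ c, M ≤ y) :
    (PySem.List.min? c (fun y => y)).getD 0 = M := by
  cases hx : PySem.List.min? c (fun y => y) with
  | none =>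
      rw [PySem.List.min?_eq_none_iff] at hx
      simp [hx] at hM
  | some M' =>
      have h1 : M' ∈ c := PySem.List.min?_mem hx
      have h2 := PySem.List.min?_isMin hx
      simpa using le_antisymm (h2 M hM) (hlb M' h1)

-- the (max - min) value a combination contributes in A
def pvDiff (c : List Int) : Int :=
  (PySem.List.max? c (fun y => y)).getD 0 - (PySem.List.min? c (fun y => y)).getD 0

lemma pvDiff_perm {c c' : List Int} (h : c.Perm c') : pvDiff c = pvDiff c' := by
  rcases c with - | ⟨x, t⟩
  · have : c' = [] := h.nil_eq.symm
    simp [this]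
  · cases hx : PySem.List.max? (x :: t) (fun y => y) with
    | none => rw [PySem.List.max?_eq_none_iff] at hx; simp at hx
    | some M =>
      cases hn : PySem.List.min? (x :: t) (fun y => y) with
      | none => rw [PySem.List.min?_eq_none_iff] at hn; simp at hn
      | some N =>
        have hM := PySem.List.max?_mem hx
        have hMub := PySem.List.max?_isMax hx
        have hN := PySem.List.min?_mem hn
        have hNlb := PySem.List.min?_isMin hn
        unfold pvDiff
        rw [hx, hn,
          pyMax_eq_of_isMax (h.mem_iff.mp hM) (fun y hy => by simpa using hMub y (h.mem_iff.mpr hy)),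
          pyMin_eq_of_isMin (h.mem_iff.mp hN) (fun y hy => by simpa using hNlb y (h.mem_iff.mpr hy))]
        simp

-- monotone indexing in a ≤-sorted list
lemma getD_mono_of_pairwise {l : List Int} (hl : l.Pairwise (· ≤ ·)) {p q : Nat}
    (hpq : p ≤ q) (hq : q < l.length) : l.getD p 0 ≤ l.getD q 0 := by
  rcases Nat.eq_or_lt_of_le hpq with rfl | hlt
  · exact le_refl _
  · rw [List.getD_eq_getElem l 0 (lt_of_le_of_lt hpq hq), List.getD_eq_getElem l 0 hq]
    exact (List.pairwise_iff_getElem.mp hl) p q _ hq hlt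

-- a sublist of a sorted list dominates it pointwise
lemma sublist_getD_le {s t : List Int} (h : t.Sublist s) (hs : s.Pairwise (· ≤ ·)) :
    ∀ j < t.length, s.getD j 0 ≤ t.getD j 0 := by
  induction h with
  | slnil => intro j hj; simp at hj
  | cons a h ih =>
      rename_i t' l
      intro j hj
      rcases List.pairwise_cons.mp hs with ⟨ha, hl⟩
      cases j with
      | zero =>
          have ht : t' ≠ [] := by intro h0; simp [h0] at hj
          have : t'.getD 0 0 ∈ t' := by
            rw [List.getD_eq_getElem t' 0 hj]; exact List.getElem_mem _
          simpa using ha _ (h.subset this)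
      | succ j' =>
          have h1 : l.getD j' 0 ≤ l.getD (j' + 1) 0 :=
            getD_mono_of_pairwise hl (Nat.le_succ j') (lt_of_lt_of_le hj h.length_le)
          simpa using le_trans h1 (ih hl (j' + 1) hj)
  | cons₂ a h ih =>
      intro j hj
      cases j with
      | zero => simp
      | succ j' =>
          rcases List.pairwise_cons.mp hs with ⟨-, hl⟩
          simpa using ih hl j' (by simpa using hj)

-- every nonempty sublist of a sorted list lies over some window of the same length
lemma sublist_window {s t : List Int} (h : t.Sublist s) (hs : s.Pairwise (· ≤ ·))
    (ht : t ≠ []) :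
    ∃ i, i + t.length ≤ s.length ∧ s.getD i 0 = t.getD 0 0 ∧
      ∀ j < t.length, s.getD (i + j) 0 ≤ t.getD j 0 := by
  induction h with
  | slnil => exact absurd rfl ht
  | cons a h ih =>
      rcases List.pairwise_cons.mp hs with ⟨-, hl⟩
      obtain ⟨i, h1, h2, h3⟩ := ih hl ht
      refine ⟨i + 1, by simp; omega, by simpa using h2, ?_⟩
      intro j hj
      have := h3 j hj
      simpa [Nat.add_right_comm i 1 j] using this
  | cons₂ a h ih =>
      rcases List.pairwise_cons.mp hs with ⟨-, hl⟩
      refine ⟨0, by simpa using Nat.add_le_add_right h.length_le 1, by simp, ?_⟩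
      intro j hj
      cases j with
      | zero => simp
      | succ j' => simpa using sublist_getD_le h hl j' (by simpa using hj)

-- min-fold antisymmetry: mutually dominated lists fold to the same minimum
lemma foldl_min_eq {l₁ l₂ : List Int} (a : Int)
    (h₁ : ∀ x ∈ l₁, ∃ y ∈ l₂, y ≤ x) (h₂ : ∀ y ∈ l₂, ∃ x ∈ l₁, x ≤ y) :
    l₁.foldl min a = l₂.foldl min a := by
  have key : ∀ (u v : List Int), (∀ x ∈ u, ∃ y ∈ v, y ≤ x) →
      v.foldl min a ≤ u.foldl min a := by
    intro u v hu
    rcases PySem.List.foldl_min_mem u a with he | he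
    · rw [he]; exact (PySem.List.foldl_min_le v a).1
    · obtain ⟨y, hy, hyx⟩ := hu _ he
      exact le_trans ((PySem.List.foldl_min_le v a).2 y hy) hyx
  exact le_antisymm (key l₂ l₁ h₂) (key l₁ l₂ h₁)

-- A's loop is a min-fold over the diffs of all combinations
lemma portA_eq_foldl (arr : List Int) (m : Int) :
    simpleSolution arr m =
      ((PySem.List.combinations arr m.toNat).map pvDiff).foldl min 1000000000 := by
  dsimp only [simpleSolution]
  rw [List.foldl_map]
  exact PySem.List.foldl_congr_mem _ _ _ _ (fun acc c _ => by
    simp only [pvDiff, min_def]; split_ifs <;> omega)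

-- B's windows: element description
lemma ws_getElem (s : List Int) (j i : Nat) (hi : i < ((s.zip (s.drop j)).map (fun p => p.2 - p.1)).length) :
    ((s.zip (s.drop j)).map (fun p => p.2 - p.1))[i] = s.getD (j + i) 0 - s.getD i 0 := by
  have hlen : i < (s.zip (s.drop j)).length := by simpa using hi
  have hi2 : i < (s.drop j).length := by
    simp only [List.length_zip, lt_min_iff] at hlen; exact hlen.2
  have hi1 : i < s.length := by
    simp only [List.length_zip, lt_min_iff] at hlen; exact hlen.1
  have hji : j + i < s.length := by
    have := hi2; rw [List.length_drop] at this; omega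
  simp [List.getElem_zip, List.getD, hji, hi1]

-- max - min of a nonempty ≤-sorted list is last - first
lemma pvDiff_sorted {t : List Int} (htp : t.Pairwise (· ≤ ·)) {r : Nat}
    (hlt : t.length = r + 1) : pvDiff t = t.getD r 0 - t.getD 0 0 := by
  have h0 : 0 < t.length := by omega
  have hr : r < t.length := by omega
  have hmemr : t.getD r 0 ∈ t := by
    rw [List.getD_eq_getElem t 0 hr]; exact List.getElem_mem _
  have hmem0 : t.getD 0 0 ∈ t := by
    rw [List.getD_eq_getElem t 0 h0]; exact List.getElem_mem _
  have hub : ∀ y ∈ t, y ≤ t.getD r 0 := by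
    intro y hy
    obtain ⟨p, hp, rfl⟩ := List.mem_iff_getElem.mp hy
    rw [← List.getD_eq_getElem t 0 hp]
    exact getD_mono_of_pairwise htp (by omega) hr
  have hlb : ∀ y ∈ t, t.getD 0 0 ≤ y := by
    intro y hy
    obtain ⟨p, hp, rfl⟩ := List.mem_iff_getElem.mp hy
    rw [← List.getD_eq_getElem t 0 hp]
    exact getD_mono_of_pairwise htp (Nat.zero_le p) hp
  unfold pvDiff
  rw [pyMax_eq_of_isMax hmemr hub, pyMin_eq_of_isMin hmem0 hlb]

-- ===== VERDICT (by name: the statement is the Claim_ definition above) =====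
theorem simpleSolution_spec : Claim_equal_simpleSolution := by
  intro arr m _ hm
  unfold Spec_simpleSolution
  dsimp only [simpleSolution_alt]
  have hm1 : (0 : Int) ≤ m - 1 := sub_nonneg.mpr hm
  set s := PySem.List.sorted arr (fun x : Int => x) false with hs_def
  have hs : s.Pairwise (· ≤ ·) := by
    simpa using PySem.List.sorted_pairwise (xs := arr) (key := fun x : Int => x)
  have hperm : s.Perm arr := PySem.List.sorted_perm arr _ _
  rw [PySem.List.slice_from _ hm1]
  set j : Nat := (m - 1).toNat with hj_def
  have hjm : m.toNat = j + 1 := by omega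
  rw [PySem.List.min?_id_cons, Option.getD_some, portA_eq_foldl]
  refine foldl_min_eq 1000000000 ?_ ?_
  · -- every combination's diff is ≥ some window diff
    intro x hx
    obtain ⟨c, hc, rfl⟩ := List.mem_map.mp hx
    obtain ⟨hsub, hlenc⟩ := (PySem.List.mem_combinations_iff arr m.toNat c).mp hc
    obtain ⟨t, htc, hts⟩ : List.Subperm c s := hsub.subperm.trans hperm.symm.subperm
    have hlt : t.length = j + 1 := by rw [htc.length_eq, hlenc, hjm]
    have htne : t ≠ [] := by intro h0; rw [h0] at hlt; simp at hlt
    obtain ⟨i, h1, h2, h3⟩ := sublist_window hts hs htne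
    have hpd : pvDiff c = t.getD j 0 - t.getD 0 0 :=
      (pvDiff_perm htc.symm).trans (pvDiff_sorted (hs.sublist hts) (by omega))
    have hiw : i < (List.map (fun p : Int × Int => p.2 - p.1) (s.zip (s.drop j))).length := by
      simp only [List.length_map, List.length_zip, List.length_drop]
      omega
    refine ⟨s.getD (i + j) 0 - s.getD i 0, ?_, ?_⟩
    · refine List.mem_iff_getElem.mpr ⟨i, hiw, ?_⟩
      rw [ws_getElem s j i hiw, Nat.add_comm j i]
    · rw [hpd, h2]
      have := h3 j (by omega)
      omega
  · -- every window diff is realised by a combination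
    intro y hy
    obtain ⟨i, hi, rfl⟩ := List.mem_iff_getElem.mp hy
    have hi' : i < s.length ∧ i + j < s.length := by
      simp only [List.length_map, List.length_zip, List.length_drop, lt_min_iff] at hi
      constructor
      · exact hi.1
      · omega
    set w : List Int := (s.drop i).take (j + 1) with hw_def
    have hlw : w.length = j + 1 := by
      rw [hw_def, List.length_take, List.length_drop]; omega
    have hwsub : w.Sublist s := ((s.drop i).take_sublist _).trans (s.drop_sublist i)
    obtain ⟨c, hcw, hcarr⟩ : List.Subperm w arr := hwsub.subperm.trans hperm.subperm
    have hcmem : c ∈ PySem.List.combinations arr m.toNat :=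
      (PySem.List.mem_combinations_iff arr m.toNat c).mpr ⟨hcarr, by rw [hcw.length_eq, hlw, hjm]⟩
    have hwget : ∀ p, p < j + 1 → w.getD p 0 = s.getD (i + p) 0 := by
      intro p hp
      have hip : i + p < s.length := by omega
      rw [hw_def, List.getD_eq_getElem _ 0 (by rw [List.length_take, List.length_drop]; omega),
        List.getElem_take, List.getElem_drop, List.getD_eq_getElem s 0 hip]
    have hpd : pvDiff c = s.getD (i + j) 0 - s.getD i 0 := by
      rw [pvDiff_perm hcw, pvDiff_sorted (hs.sublist hwsub) (by omega),
        hwget j (by omega), hwget 0 (by omega), Nat.add_zero]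
    refine ⟨pvDiff c, List.mem_map.mpr ⟨c, hcmem, rfl⟩, ?_⟩
    rw [hpd, ws_getElem s j i hi, Nat.add_comm j i]
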